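-- pv_equiv track=rewrite | github.com/study-algorithms/PS-study | project1/week11/Kyunghwan/programmers_인사고과.py | solution
-- ===== SOURCE A (Python) =====
-- def solution(scores):
--     answer = 1
--     wan, wan_score = scores[0], sum(scores[0])
--     scores = sorted(scores, key=lambda x:(-x[0], x[1]))
--     before_partner_point = 0
--     for score in scores:
--         # 완호 인센 x
--         if wan[0] < score[0] and wan[1] < score[1]:
--             return -1
--
--         # 다른애들 인센 x
--         if score[1] < before_partner_point:
--             continue
--
--         if wan_score < sum(score) :
--             answer+=1
--         before_partner_point = score[1]
--
--     return answer
-- ===== SOURCE B (Python) =====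
-- def solution(scores):
--     wan = scores[0]
--     wan_score = sum(wan)
--     if any(q[0] > wan[0] and q[1] > wan[1] for q in scores):
--         return -1
--     answer = 1
--     for p in scores:
--         bar = max([0] + [q[1] for q in scores if q[0] > p[0]])
--         if p[1] >= bar and sum(p) > wan_score:
--             answer += 1
--     return answer
-- ===== Notes on version B (the rewrite author's own statement) =====
-- stated objective: alternative
-- what changed: Replaces A's sort-by-(-a,b) plus single stateful scan (early return, skip, running before_partner_point) with a direct nested-loop: return -1 if anyone strictly beats scores[0] in both categories, else count the people whose total exceeds scores[0]'s and whose second score reaches the bar max([0] + [q[1] for q with a strictly higher first score]).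
import Mathlib
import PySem

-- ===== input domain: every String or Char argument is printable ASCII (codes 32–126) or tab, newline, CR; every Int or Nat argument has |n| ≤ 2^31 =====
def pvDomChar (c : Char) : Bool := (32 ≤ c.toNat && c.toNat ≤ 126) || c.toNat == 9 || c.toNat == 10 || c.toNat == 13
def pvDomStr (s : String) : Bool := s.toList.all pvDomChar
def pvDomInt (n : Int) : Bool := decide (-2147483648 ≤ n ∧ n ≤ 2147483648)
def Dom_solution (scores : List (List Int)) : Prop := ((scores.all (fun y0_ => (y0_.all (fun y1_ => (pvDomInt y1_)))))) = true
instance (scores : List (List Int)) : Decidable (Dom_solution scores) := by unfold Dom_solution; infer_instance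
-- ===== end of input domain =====

-- B replaces A's sort-plus-stateful-scan with a direct nested-loop domination/bar count (objective: alternative, same answer);
-- A rebinds its local name 'scores' to a new sorted list but never mutates the argument.

-- ===== PORT A =====
-- x[0] / x[1] subscripting, shared by both ports (in range under Pre_solution)
def pvG0 (s : List Int) : Int := PySem.List.pyGetD s 0 0
def pvG1 (s : List Int) : Int := PySem.List.pyGetD s 1 0

-- the loop of A: early 'return -1', 'continue' on a skipped partner, accumulator (answer, before_partner_point)
def pvSolAuxA (w0 w1 ws : Int) : List (List Int) → Int → Int → Int
  | [], ans, _ => ans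
  | s :: rest, ans, before =>
    if w0 < pvG0 s ∧ w1 < pvG1 s then -1
    else if pvG1 s < before then pvSolAuxA w0 w1 ws rest ans before
    else pvSolAuxA w0 w1 ws rest (if ws < s.sum then ans + 1 else ans) (pvG1 s)

def solution (scores : List (List Int)) : Int :=
  match PySem.List.pyGet? scores 0 with
  | none => 0  -- IndexError (empty scores); excluded by Pre_solution
  | some wan =>
    pvSolAuxA (pvG0 wan) (pvG1 wan) wan.sum
      (PySem.List.sorted2 scores (fun x => -(pvG0 x)) (fun x => pvG1 x)) 1 0

-- ===== PORT B =====
-- 'any(q[0] > p[0] and q[1] > p[1] for q in l)'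
def pvBeats (l : List (List Int)) (p : List Int) : Bool :=
  l.any (fun q => decide (pvG0 p < pvG0 q) && decide (pvG1 p < pvG1 q))

-- 'max([0] + [q[1] for q in l if q[0] > p[0]])': Python's max of the list 0 :: xs is the running max over xs started at 0 (exact)
def pvBar (l : List (List Int)) (p : List Int) : Int :=
  ((l.filter (fun q => decide (pvG0 p < pvG0 q))).map pvG1).foldl max 0

def solution_alt (scores : List (List Int)) : Int :=
  match PySem.List.pyGet? scores 0 with
  | none => 0  -- IndexError (empty scores); excluded by Pre_solution
  | some wan =>
    let ws := wan.sum
    if pvBeats scores wan then -1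
    else scores.foldl
      (fun ans p => if decide (pvBar scores p ≤ pvG1 p) && decide (ws < p.sum) then ans + 1 else ans) 1

-- ===== PRECONDITION & SPEC =====
-- Pre_: A raises IndexError on empty scores and on any row of length < 2 (wan[1]/score[1]/the sort key x[1]).
def Pre_solution (scores : List (List Int)) : Prop :=
  scores ≠ [] ∧ ∀ s ∈ scores, 2 ≤ s.length
instance (scores : List (List Int)) : Decidable (Pre_solution scores) := by
  unfold Pre_solution; infer_instance

def pvWitness_solution : List (List Int) := [[1, 2]]

def Spec_solution (scores : List (List Int)) (out : Int) : Prop := out = solution_alt scores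
instance (scores : List (List Int)) (out : Int) : Decidable (Spec_solution scores out) := by
  unfold Spec_solution; infer_instance

-- ===== CLAIM (what is proved, stated in full; the proofs are below) =====
def Claim_equal_solution : Prop := ∀ (scores : List (List Int)), Dom_solution scores → Pre_solution scores → Spec_solution scores (solution scores)

-- ===== LEMMAS AND PROOFS =====

-- the comparator sorted2 uses for the key (-x[0], x[1])
def pvLt (a b : List Int) : Bool :=
  decide ((-(pvG0 a)) < (-(pvG0 b))) || (!decide ((-(pvG0 b)) < (-(pvG0 a))) && decide (pvG1 a < pvG1 b))

theorem pvSorted2_eq (scores : List (List Int)) :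
    PySem.List.sorted2 scores (fun x => -(pvG0 x)) (fun x => pvG1 x) =
      scores.foldl (fun acc x => PySem.List.insertBy pvLt x acc) [] := rfl

-- the sorted-order relation: a may come before b in sorted order
def pvR (a b : List Int) : Prop := pvG0 b < pvG0 a ∨ (pvG0 a = pvG0 b ∧ pvG1 a ≤ pvG1 b)

theorem pvLt_false_iff (a b : List Int) : pvLt b a = false ↔ pvR a b := by
  simp [pvLt, pvR]; omega

theorem pvLt_trans (a b c : List Int) (h1 : pvLt a b = true) (h2 : pvLt b c = true) :
    pvLt a c = true := by
  simp [pvLt] at *; omega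

theorem pvLt_asym (a b : List Int) (h : pvLt a b = true) : pvLt b a = false := by
  simp [pvLt] at *; omega

theorem pvInsertBy_pairwise (x : List Int) (ys : List (List Int))
    (h : ys.Pairwise (fun a b => pvLt b a = false)) :
    (PySem.List.insertBy pvLt x ys).Pairwise (fun a b => pvLt b a = false) := by
  induction ys with
  | nil => simp [PySem.List.insertBy]
  | cons y ys ih =>
    rcases List.pairwise_cons.1 h with ⟨hy, hys⟩
    rw [PySem.List.insertBy.eq_2]
    by_cases hxy : pvLt x y = true
    · simp only [hxy, if_true]
      refine List.pairwise_cons.2 ⟨?_, h⟩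
      intro z hz
      rcases List.mem_cons.1 hz with rfl | hz
      · exact pvLt_asym _ _ hxy
      · by_contra hzx
        have := pvLt_trans z x y (by simpa using hzx) hxy
        rw [hy z hz] at this; exact Bool.false_ne_true this
    · simp only [hxy]
      rw [if_neg (by simp)]
      refine List.pairwise_cons.2 ⟨?_, ih hys⟩
      intro z hz
      rcases (PySem.List.mem_insertBy _ _ _ _).1 hz with rfl | hz
      · simpa using hxy
      · exact hy z hz

theorem pvFoldl_insertBy_pairwise (xs acc : List (List Int))
    (h : acc.Pairwise (fun a b => pvLt b a = false)) :
    (xs.foldl (fun acc x => PySem.List.insertBy pvLt x acc) acc).Pairwise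
      (fun a b => pvLt b a = false) := by
  induction xs generalizing acc with
  | nil => simpa using h
  | cons x xs ih => exact ih _ (pvInsertBy_pairwise x acc h)

theorem pvSorted_pairwise (scores : List (List Int)) :
    (PySem.List.sorted2 scores (fun x => -(pvG0 x)) (fun x => pvG1 x)).Pairwise pvR := by
  rw [pvSorted2_eq]
  exact List.Pairwise.imp (fun h => (pvLt_false_iff _ _).1 h)
    (pvFoldl_insertBy_pairwise scores [] (by simp))

theorem pvBeats_iff (l : List (List Int)) (p : List Int) :
    pvBeats l p = true ↔ ∃ q ∈ l, pvG0 p < pvG0 q ∧ pvG1 p < pvG1 q := by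
  simp [pvBeats]

theorem pvBeats_perm (l l' : List (List Int)) (hp : l.Perm l') (p : List Int) :
    pvBeats l p = pvBeats l' p := by
  rw [Bool.eq_iff_iff, pvBeats_iff, pvBeats_iff]
  constructor
  · rintro ⟨q, hq, h⟩; exact ⟨q, hp.mem_iff.mp hq, h⟩
  · rintro ⟨q, hq, h⟩; exact ⟨q, hp.mem_iff.mpr hq, h⟩

-- A returns -1 as soon as someone in the remaining list strictly dominates Wanho
theorem pvAuxA_neg_one (w0 w1 ws : Int) (l : List (List Int)) (ans before : Int)
    (h : ∃ s ∈ l, w0 < pvG0 s ∧ w1 < pvG1 s) :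
    pvSolAuxA w0 w1 ws l ans before = -1 := by
  induction l generalizing ans before with
  | nil => simp at h
  | cons s rest ih =>
    rcases h with ⟨t, ht, hdomt⟩
    by_cases hs : w0 < pvG0 s ∧ w1 < pvG1 s
    · simp [pvSolAuxA, hs]
    · have ht' : t ∈ rest := by
        rcases List.mem_cons.1 ht with rfl | ht'
        · exact absurd hdomt hs
        · exact ht'
      by_cases hskip : pvG1 s < before <;>
        simp [pvSolAuxA, hs, hskip, ih _ _ ⟨t, ht', hdomt⟩]

-- the skip/count scan of A, isolated from the early return and the running answer
def pvK (ws before : Int) : List (List Int) → Int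
  | [] => 0
  | s :: rest =>
    if pvG1 s < before then pvK ws before rest
    else (if ws < s.sum then 1 else 0) + pvK ws (pvG1 s) rest

theorem pvAuxA_eq_K (w0 w1 ws : Int) (l : List (List Int)) (ans before : Int)
    (h : ∀ s ∈ l, ¬(w0 < pvG0 s ∧ w1 < pvG1 s)) :
    pvSolAuxA w0 w1 ws l ans before = ans + pvK ws before l := by
  induction l generalizing ans before with
  | nil => simp [pvSolAuxA, pvK]
  | cons s rest ih =>
    have hs := h s (by simp)
    have hrest : ∀ t ∈ rest, ¬(w0 < pvG0 t ∧ w1 < pvG1 t) := fun t ht => h t (by simp [ht])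
    by_cases hskip : pvG1 s < before
    · simp [pvSolAuxA, pvK, hs, hskip, ih _ _ hrest]
    · by_cases hc : ws < s.sum <;>
        simp [pvSolAuxA, pvK, hs, hskip, hc, ih _ _ hrest] <;> omega

-- the predicate A's scan effectively counts, on a pvR-sorted list
theorem pvK_eq_countP (ws : Int) (l : List (List Int)) (before : Int) (h : l.Pairwise pvR) :
    pvK ws before l =
      (l.countP (fun p => decide (before ≤ pvG1 p) && decide (ws < p.sum) && !pvBeats l p) : Int) := by
  induction l generalizing before with
  | nil => simp [pvK]
  | cons s rest ih =>
    rcases List.pairwise_cons.1 h with ⟨hsR, hrest⟩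
    rw [List.countP_cons]
    by_cases hskip : pvG1 s < before
    · -- s is skipped, and s cannot dominate anyone whose p[1] clears `before`
      have hhead : (decide (before ≤ pvG1 s) && decide (ws < s.sum) && !pvBeats (s :: rest) s) = false := by
        have : decide (before ≤ pvG1 s) = false := by simp; omega
        simp [this]
      have hcong : rest.countP
            (fun p => decide (before ≤ pvG1 p) && decide (ws < p.sum) && !pvBeats (s :: rest) p) =
          rest.countP
            (fun p => decide (before ≤ pvG1 p) && decide (ws < p.sum) && !pvBeats rest p) := by
        apply List.countP_congr
        intro p hp
        simp only [Bool.and_eq_true, Bool.not_eq_true', decide_eq_true_eq]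
        constructor
        · rintro ⟨⟨h1, h2⟩, h3⟩
          refine ⟨⟨h1, h2⟩, ?_⟩
          rw [Bool.eq_false_iff]
          intro hr
          rw [Bool.eq_false_iff] at h3
          apply h3
          rw [pvBeats_iff] at hr ⊢
          rcases hr with ⟨q, hq, hd⟩
          exact ⟨q, by simp [hq], hd⟩
        · rintro ⟨⟨h1, h2⟩, h3⟩
          refine ⟨⟨h1, h2⟩, ?_⟩
          rw [Bool.eq_false_iff]
          intro hr
          rw [pvBeats_iff] at hr
          rcases hr with ⟨q, hq, hd⟩
          rcases List.mem_cons.1 hq with rfl | hq'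
          · omega
          · rw [Bool.eq_false_iff] at h3
            exact h3 ((pvBeats_iff _ _).2 ⟨q, hq', hd⟩)
      rw [pvK, if_pos hskip, ih _ hrest, hcong, hhead]
      simp
    · -- s is kept; s is undominated in (s :: rest), and for the tail `before` becomes pvG1 s
      have hnd : pvBeats (s :: rest) s = false := by
        rw [Bool.eq_false_iff]
        intro hr
        rw [pvBeats_iff] at hr
        rcases hr with ⟨q, hq, hd⟩
        rcases List.mem_cons.1 hq with rfl | hq'
        · omega
        · have := hsR q hq'
          unfold pvR at this
          omega
      have hhead : (decide (before ≤ pvG1 s) && decide (ws < s.sum) && !pvBeats (s :: rest) s) =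
          decide (ws < s.sum) := by
        have h1 : decide (before ≤ pvG1 s) = true := by simp; omega
        simp [h1, hnd]
      have hcong : rest.countP
            (fun p => decide (before ≤ pvG1 p) && decide (ws < p.sum) && !pvBeats (s :: rest) p) =
          rest.countP
            (fun p => decide (pvG1 s ≤ pvG1 p) && decide (ws < p.sum) && !pvBeats rest p) := by
        apply List.countP_congr
        intro p hp
        have hsp := hsR p hp
        unfold pvR at hsp
        simp only [Bool.and_eq_true, Bool.not_eq_true', decide_eq_true_eq]
        have hcons : pvBeats (s :: rest) p = true ↔
            ((pvG0 p < pvG0 s ∧ pvG1 p < pvG1 s) ∨ pvBeats rest p = true) := by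
          rw [pvBeats_iff, pvBeats_iff]
          constructor
          · rintro ⟨q, hq, hd⟩
            rcases List.mem_cons.1 hq with rfl | hq'
            · exact Or.inl hd
            · exact Or.inr ⟨q, hq', hd⟩
          · rintro (hd | ⟨q, hq', hd⟩)
            · exact ⟨s, by simp, hd⟩
            · exact ⟨q, by simp [hq'], hd⟩
        constructor
        · rintro ⟨⟨h1, h2⟩, h3⟩
          rw [Bool.eq_false_iff] at h3
          refine ⟨⟨?_, h2⟩, ?_⟩
          · by_contra hlt
            exact h3 (hcons.2 (Or.inl (by omega)))
          · rw [Bool.eq_false_iff]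
            intro hr
            exact h3 (hcons.2 (Or.inr hr))
        · rintro ⟨⟨h1, h2⟩, h3⟩
          rw [Bool.eq_false_iff] at h3
          refine ⟨⟨by omega, h2⟩, ?_⟩
          rw [Bool.eq_false_iff]
          intro hr
          rcases hcons.1 hr with hd | hd
          · omega
          · exact h3 hd
      rw [pvK, if_neg hskip, ih _ hrest, hcong, hhead]
      by_cases hc : ws < s.sum <;> simp [hc] <;> omega

-- A on a non-empty input, as a domination count over the original list
theorem pvSolution_cases (s0 : List Int) (t : List (List Int)) :
    solution (s0 :: t) =
      if pvBeats (s0 :: t) s0 then -1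
      else 1 + (((s0 :: t).countP
        (fun p => decide (0 ≤ pvG1 p) && decide (s0.sum < p.sum) && !pvBeats (s0 :: t) p)) : Int) := by
  have hperm := PySem.List.sorted2_perm (s0 :: t) (fun x => -(pvG0 x)) (fun x => pvG1 x) false
  simp only [solution, PySem.List.pyGet?_zero_cons]
  by_cases hd : pvBeats (s0 :: t) s0 = true
  · rw [if_pos hd]
    rcases (pvBeats_iff _ _).1 hd with ⟨q, hq, h1, h2⟩
    exact pvAuxA_neg_one _ _ _ _ _ _ ⟨q, hperm.mem_iff.mpr hq, h1, h2⟩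
  · rw [if_neg hd]
    have hnone : ∀ s ∈ PySem.List.sorted2 (s0 :: t) (fun x => -(pvG0 x)) (fun x => pvG1 x),
        ¬(pvG0 s0 < pvG0 s ∧ pvG1 s0 < pvG1 s) := by
      intro s hs hcontra
      exact hd ((pvBeats_iff _ _).2 ⟨s, hperm.mem_iff.mp hs, hcontra⟩)
    rw [pvAuxA_eq_K _ _ _ _ _ _ hnone, pvK_eq_countP _ _ _ (pvSorted_pairwise _)]
    congr 2
    rw [List.countP_congr (fun p _ => by rw [pvBeats_perm _ _ hperm p])]
    exact hperm.countP_eq _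

-- B on a non-empty input, as the same domination count over the original list
theorem pvBar_le_iff (l : List (List Int)) (p : List Int) :
    pvBar l p ≤ pvG1 p ↔ (0 ≤ pvG1 p ∧ pvBeats l p = false) := by
  unfold pvBar
  constructor
  · intro h
    refine ⟨le_trans (PySem.List.le_foldl_max _ _).1 h, ?_⟩
    rw [Bool.eq_false_iff]
    intro hr
    rcases (pvBeats_iff _ _).1 hr with ⟨q, hq, h0, h1⟩
    have hmem : pvG1 q ∈ (l.filter (fun q => decide (pvG0 p < pvG0 q))).map pvG1 :=
      List.mem_map_of_mem (List.mem_filter.2 ⟨hq, by simpa using h0⟩)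
    have := (PySem.List.le_foldl_max ((l.filter (fun q => decide (pvG0 p < pvG0 q))).map pvG1) 0).2
      _ hmem
    omega
  · rintro ⟨h0, hb⟩
    rcases PySem.List.foldl_max_mem ((l.filter (fun q => decide (pvG0 p < pvG0 q))).map pvG1) 0 with
      heq | hmem
    · omega
    · rcases List.mem_map.1 hmem with ⟨q, hqf, hq1⟩
      rcases List.mem_filter.1 hqf with ⟨hql, hq0⟩
      rw [Bool.eq_false_iff] at hb
      by_contra hlt
      exact hb ((pvBeats_iff _ _).2 ⟨q, hql, by simpa using hq0, by omega⟩)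

theorem pvSolutionAlt_cases (s0 : List Int) (t : List (List Int)) :
    solution_alt (s0 :: t) =
      if pvBeats (s0 :: t) s0 then -1
      else 1 + (((s0 :: t).countP
        (fun p => decide (pvBar (s0 :: t) p ≤ pvG1 p) && decide (s0.sum < p.sum))) : Int) := by
  simp only [solution_alt, PySem.List.pyGet?_zero_cons]
  by_cases hd : pvBeats (s0 :: t) s0 = true
  · rw [if_pos hd, if_pos hd]
  · rw [if_neg hd, if_neg hd]
    exact PySem.List.foldl_if_add_one _ _ _

-- ===== VERDICT (by name: the statement is the Claim_ definition above) =====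
theorem solution_spec : Claim_equal_solution := by
  intro scores _ hpre
  unfold Spec_solution
  cases scores with
  | nil => exact absurd rfl hpre.1
  | cons s0 t =>
    rw [pvSolution_cases, pvSolutionAlt_cases]
    by_cases hd : pvBeats (s0 :: t) s0 = true
    · rw [if_pos hd, if_pos hd]
    · rw [if_neg hd, if_neg hd]
      congr 2
      apply List.countP_congr
      intro p hp
      simp only [Bool.and_eq_true, Bool.not_eq_true', decide_eq_true_eq]
      rw [pvBar_le_iff]
      constructor
      · rintro ⟨⟨h1, h2⟩, h3⟩; exact ⟨⟨h1, h3⟩, h2⟩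
      · rintro ⟨⟨h1, h3⟩, h2⟩; exact ⟨⟨h1, h2⟩, h3⟩
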